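-- pv_equiv track=rewrite | github.com/jxmen/Crack-the-Coding-Interview | Baekjoon/Bronze/2588. 곱셈/곱셈.py | solution
-- ===== SOURCE A (Python) =====
-- def solution(n, m):
--     nums = []
--
--     # m을 1의 자리부터 n을 곱한 값을 nums에 담는다.
--     while m > 0:
--         # 472에서 2를 구한다.
--         m_end_num = m % 10
--         num = m_end_num * n
--         nums.append(num)
--
--         m //= 10
--
--     nums.append(sum(
--         [pow(10, i) * nums[i] for i in range(len(nums))])
--     )
--     return nums
-- ===== SOURCE B (Python) =====
-- def solution(n, m):
--     # Partial products of each digit of m with n, least-significant first;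
--     # the place-weighted total of those partials is just n * m (closed form),
--     # so no second weighted-sum pass is needed.
--     if m <= 0:
--         return [0]
--
--     def partials(k):
--         if k <= 0:
--             return []
--         return [(k % 10) * n] + partials(k // 10)
--
--     return partials(m) + [n * m]
-- ===== Notes on version B (the rewrite author's own statement) =====
-- stated objective: simpler
-- what changed: Digit extraction becomes a recursive helper building the list directly, and A's second pass (the comprehension summing pow(10,i)*nums[i]) is replaced by the closed form n*m (0 when m<=0), proved equal to the weighted sum.
import Mathlib
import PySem

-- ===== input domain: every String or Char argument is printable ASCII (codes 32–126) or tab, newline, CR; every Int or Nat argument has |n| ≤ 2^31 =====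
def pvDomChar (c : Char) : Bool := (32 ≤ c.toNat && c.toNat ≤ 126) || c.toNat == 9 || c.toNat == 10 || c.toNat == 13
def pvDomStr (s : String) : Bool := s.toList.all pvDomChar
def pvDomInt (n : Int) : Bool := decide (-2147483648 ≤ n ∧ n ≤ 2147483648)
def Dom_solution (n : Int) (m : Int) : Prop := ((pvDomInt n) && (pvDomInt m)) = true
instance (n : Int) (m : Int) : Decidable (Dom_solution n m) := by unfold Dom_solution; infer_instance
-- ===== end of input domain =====

-- B replaces A's second weighted-sum pass by the closed form n*m ([0] when m ≤ 0); return-value equivalence proved on all inputs.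

-- ===== PORT A =====
-- while m > 0: nums.append((m % 10) * n); m //= 10
def solutionLoop (n : Int) (m : Int) (nums : List Int) : List Int :=
  if _h : 0 < m then
    solutionLoop n (PySem.Int.floordiv m 10) (nums ++ [PySem.Int.mod m 10 * n])
  else nums
termination_by m.toNat
decreasing_by
  have : PySem.Int.floordiv m 10 = m / 10 := PySem.Int.floordiv_eq_ediv_of_pos (by omega)
  rw [this]; omega

def solution (n : Int) (m : Int) : List Int :=
  let nums := solutionLoop n m []
  -- nums[i] for i in range(len(nums)): i is always in range, so pyGetD is exact here
  nums ++ [((PySem.List.pyRange 0 nums.length 1).map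
    (fun i => (10:Int) ^ i.toNat * PySem.List.pyGetD nums i 0)).sum]

-- ===== PORT B =====
def solutionAltPartials (n : Int) (k : Int) : List Int :=
  if _h : 0 < k then
    PySem.Int.mod k 10 * n :: solutionAltPartials n (PySem.Int.floordiv k 10)
  else []
termination_by k.toNat
decreasing_by
  have : PySem.Int.floordiv k 10 = k / 10 := PySem.Int.floordiv_eq_ediv_of_pos (by omega)
  rw [this]; omega

def solution_alt (n : Int) (m : Int) : List Int :=
  if m ≤ 0 then [0] else solutionAltPartials n m ++ [n * m]

-- ===== PRECONDITION & SPEC =====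
def Spec_solution (n : Int) (m : Int) (out : List Int) : Prop := out = solution_alt n m
instance (n : Int) (m : Int) (out : List Int) : Decidable (Spec_solution n m out) := by unfold Spec_solution; infer_instance

-- ===== CLAIM (what is proved, stated in full; the proofs are below) =====
def Claim_equal_solution : Prop := ∀ (n : Int) (m : Int), Dom_solution n m → Spec_solution n m (solution n m)

-- ===== LEMMAS AND PROOFS =====

-- the place-weighted value of a list of partial products
def wsum : List Int → Int
  | [] => 0
  | a :: l => a + 10 * wsum l

theorem solutionLoop_eq (n : Int) (m : Int) (nums : List Int) :
    solutionLoop n m nums = nums ++ solutionAltPartials n m := by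
  fun_induction solutionLoop n m nums with
  | case1 m nums h ih =>
      rw [ih]
      conv_rhs => rw [solutionAltPartials]
      simp [h]
  | case2 m nums h =>
      rw [solutionAltPartials]
      simp [h]

theorem wsum_partials (n : Int) (m : Int) : 0 ≤ m →
    wsum (solutionAltPartials n m) = n * m := by
  fun_induction solutionAltPartials n m with
  | case1 k h ih =>
      intro _
      have hd : PySem.Int.floordiv k 10 = k / 10 := PySem.Int.floordiv_eq_ediv_of_pos (by omega)
      have hm : PySem.Int.mod k 10 = k % 10 := PySem.Int.mod_eq_emod_of_pos (by omega)
      rw [hd] at ih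
      simp only [wsum, hd, hm, ih (by positivity)]
      have h10 : 10 * (k / 10) + k % 10 = k := Int.mul_ediv_add_emod k 10
      linear_combination n * h10
  | case2 k h =>
      intro hk
      have hz : k = 0 := by omega
      simp [wsum, hz]

theorem weighted_sum_eq_wsum : ∀ (l : List Int),
    ((PySem.List.pyRange 0 l.length 1).map
      (fun i => (10:Int) ^ i.toNat * PySem.List.pyGetD l i 0)).sum = wsum l := by
  intro l
  rw [PySem.List.pyRange_one]
  simp only [Int.sub_zero, Int.toNat_natCast, List.map_map]
  induction l with
  | nil => simp [wsum]
  | cons a l ih =>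
      rw [List.length_cons, List.range_succ_eq_map, List.map_cons, List.sum_cons]
      simp only [List.map_map]
      have hf : (((fun i => (10:Int) ^ i.toNat * PySem.List.pyGetD (a :: l) i 0) ∘
            fun k : Nat => (0:Int) + ↑k) ∘ Nat.succ) =
          fun k : Nat => 10 * (((fun i => (10:Int) ^ i.toNat * PySem.List.pyGetD l i 0) ∘
            fun k : Nat => (0:Int) + ↑k) k) := by
        funext k
        simp only [Function.comp_apply, zero_add]
        have h1 : ((Nat.succ k : Nat) : Int) = ((k + 1 : Nat) : Int) := by push_cast; ring
        rw [h1, PySem.List.pyGetD_natCast, PySem.List.pyGetD_natCast]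
        simp [pow_succ]
        ring
      rw [hf, List.sum_map_mul_left, ih]
      have h0 : ((fun i => (10:Int) ^ i.toNat * PySem.List.pyGetD (a :: l) i 0) ∘
          fun k : Nat => (0:Int) + ↑k) 0 = a := by
        simp [PySem.List.pyGetD]
      rw [h0, wsum]

-- ===== VERDICT (by name: the statement is the Claim_ definition above) =====
theorem solution_spec : Claim_equal_solution := by
  intro n m _
  show solution n m = solution_alt n m
  unfold solution solution_alt
  simp only [solutionLoop_eq, List.nil_append]
  rw [weighted_sum_eq_wsum]
  by_cases hm : m ≤ 0
  · rw [if_pos hm, solutionAltPartials]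
    simp [show ¬(0 < m) from by omega, wsum]
  · rw [if_neg hm, wsum_partials n m (by omega)]
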